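-- pv_equiv track=rewrite | github.com/xx0hn/Algorithm | 2021 LINE studio coding test/1.py | solution
-- ===== SOURCE A (Python) =====
-- def solution(source):
--   dest=[]
--   source_tmp=list(source)
--   while len(source_tmp)>0:
--       tmp=set(source_tmp)
--       tmp=sorted(tmp)
--       for i in tmp:
--           dest.append(i)
--       for i in tmp:
--           source_tmp.pop(source_tmp.index(i))
--   result=''
--   for i in dest:
--       result+=i
--   return result
-- ===== SOURCE B (Python) =====
-- def solution(source):
--     cnt = {}
--     for ch in source:
--         cnt[ch] = cnt.get(ch, 0) + 1
--     chars = sorted(cnt)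
--     m = max(cnt.values()) if cnt else 0
--     out = []
--     for k in range(1, m + 1):
--         for ch in chars:
--             if cnt[ch] >= k:
--                 out.append(ch)
--     return ''.join(out)
-- ===== Notes on version B (the rewrite author's own statement) =====
-- stated objective: faster
-- what changed: Replaces the repeated peel-one-occurrence-per-pass loop (set+sort+list.index/pop every pass) with a single frequency count and one sort, then emits for each level k the sorted characters whose count is at least k.
import Mathlib
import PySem

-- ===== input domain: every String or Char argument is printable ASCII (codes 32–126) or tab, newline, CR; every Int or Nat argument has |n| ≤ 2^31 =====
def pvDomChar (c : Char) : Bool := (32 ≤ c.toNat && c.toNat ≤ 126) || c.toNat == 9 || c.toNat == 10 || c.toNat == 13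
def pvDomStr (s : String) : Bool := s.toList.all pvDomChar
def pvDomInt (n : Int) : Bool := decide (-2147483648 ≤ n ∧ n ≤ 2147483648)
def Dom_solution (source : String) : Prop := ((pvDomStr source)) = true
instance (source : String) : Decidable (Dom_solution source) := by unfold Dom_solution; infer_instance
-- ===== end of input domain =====

-- B counts frequencies once and emits, for each level k = 1..max count, the sorted
-- distinct characters of count ≥ k, instead of A's repeated peel-one-occurrence passes (faster).

-- ===== PORT A =====
-- tmp = sorted(set(source_tmp))
def pvSd (l : List Char) : List Char := PySem.List.sorted (PySem.Set.ofList l) (fun x => x) false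

-- for i in tmp: source_tmp.pop(source_tmp.index(i))  — pop at index(i) removes the FIRST
-- occurrence of i, i.e. List.erase; i is always present so Python's .index never raises.
def pvPeel (l : List Char) : List Char := (pvSd l).foldl (fun s i => s.erase i) l

-- termination fact for the while loop: each pass shortens source_tmp
theorem pvFoldlErase_length_le (tmp l : List Char) :
    (tmp.foldl (fun (s : List Char) i => s.erase i) l).length ≤ l.length := by
  induction tmp generalizing l with
  | nil => simp
  | cons c rest ih =>
      simp only [List.foldl_cons]
      exact le_trans (ih (l.erase c)) List.length_erase_le

theorem pvPeel_length_lt (l : List Char) (h : l ≠ []) : (pvPeel l).length < l.length := by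
  have hmem : ∀ x ∈ pvSd l, x ∈ l := by
    intro x hx
    have := (PySem.List.mem_sorted (xs := PySem.Set.ofList l) (key := fun x => x)
      (rev := false) (x := x)).mp hx
    exact (PySem.Set.mem_ofList _ _).mp this
  have hne : pvSd l ≠ [] := by
    intro hnil
    have : PySem.Set.ofList l = [] := by
      have := PySem.List.sorted_eq_nil_iff (xs := PySem.Set.ofList l) (key := fun x => x)
        (rev := false)
      exact this.mp hnil
    rcases List.exists_mem_of_ne_nil l h with ⟨x, hx⟩
    have : x ∈ PySem.Set.ofList l := (PySem.Set.mem_ofList _ _).mpr hx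
    simp_all
  obtain ⟨c, rest, hcr⟩ := List.exists_cons_of_ne_nil hne
  have hc : c ∈ l := hmem c (by simp [hcr])
  unfold pvPeel
  rw [hcr]
  simp only [List.foldl_cons]
  calc (rest.foldl (fun (s : List Char) i => s.erase i) (l.erase c)).length
      ≤ (l.erase c).length := pvFoldlErase_length_le rest (l.erase c)
    _ < l.length := by
        rw [List.length_erase_of_mem hc]
        have : 0 < l.length := List.length_pos_iff.mpr h
        omega

-- while len(source_tmp) > 0: append sorted(set(..)) to dest, then pop one occurrence of each
def solutionLoop (l : List Char) : List Char :=
  if h : l = [] then [] else pvSd l ++ solutionLoop (pvPeel l)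
termination_by l.length
decreasing_by exact pvPeel_length_lt l h

def solution (source : String) : String := String.ofList (solutionLoop source.toList)

-- ===== PORT B =====
def solution_alt (source : String) : String :=
  let cnt : PySem.Dict Char Int :=
    source.toList.foldl (fun d ch => d.insert ch (d.getD ch 0 + 1)) PySem.Dict.empty
  let chars := PySem.List.sorted cnt.keys (fun x => x) false
  let m : Int := match PySem.List.max? cnt.values (fun v => v) with | some v => v | none => 0
  String.ofList ((PySem.List.pyRange 1 (m + 1) 1).foldl
    (fun out k => chars.foldl (fun out ch => if k ≤ cnt.getD ch 0 then out ++ [ch] else out) out)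
    [])

-- ===== PRECONDITION & SPEC =====
def Spec_solution (source : String) (out : String) : Prop := out = solution_alt source
instance (source : String) (out : String) : Decidable (Spec_solution source out) := by unfold Spec_solution; infer_instance

-- ===== CLAIM (what is proved, stated in full; the proofs are below) =====
def Claim_equal_solution : Prop := ∀ (source : String), Dom_solution source → Spec_solution source (solution source)

-- ===== LEMMAS AND PROOFS =====

-- proof-side abbreviations for B's computation
def pvMax (l : List Char) : Int :=
  match PySem.List.max? ((PySem.Set.ofList l).map (fun k => (l.count k : Int))) (fun v => v) with
  | some v => v | none => 0

def pvLayers (l : List Char) : List Char :=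
  (PySem.List.pyRange 1 (pvMax l + 1) 1).flatMap
    (fun k => (pvSd l).filter (fun ch => decide (k ≤ (l.count ch : Int))))

theorem pvSd_nodup (l : List Char) : (pvSd l).Nodup := by
  have hp := PySem.List.sorted_perm (xs := PySem.Set.ofList l) (key := fun x : Char => x)
    (rev := false)
  exact hp.nodup_iff.mpr (PySem.Set.nodup_ofList l)

theorem mem_pvSd (l : List Char) (c : Char) : c ∈ pvSd l ↔ c ∈ l := by
  unfold pvSd
  rw [PySem.List.mem_sorted]
  exact PySem.Set.mem_ofList l c

theorem count_foldl_erase (tmp : List Char) (htmp : tmp.Nodup) (l : List Char) (c : Char) :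
    (tmp.foldl (fun (s : List Char) i => s.erase i) l).count c
      = l.count c - (if c ∈ tmp then 1 else 0) := by
  induction tmp generalizing l with
  | nil => simp
  | cons a rest ih =>
      simp only [List.foldl_cons]
      rw [ih htmp.of_cons]
      have herase : (l.erase a).count c = l.count c - (if a = c then 1 else 0) := by
        rw [List.count_erase]
        simp
      by_cases hac : a = c
      · subst hac
        have : a ∉ rest := (List.nodup_cons.mp htmp).1
        simp [this, herase]
      · have : (c ∈ a :: rest) ↔ c ∈ rest := by
          constructor
          · intro h; rcases List.mem_cons.mp h with h | h
            · exact absurd h.symm hac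
            · exact h
          · exact fun h => List.mem_cons_of_mem _ h
        rw [herase]
        simp [this, hac]

theorem count_pvPeel (l : List Char) (c : Char) :
    (pvPeel l).count c = l.count c - (if c ∈ l then 1 else 0) := by
  unfold pvPeel
  rw [count_foldl_erase _ (pvSd_nodup l)]
  simp [mem_pvSd]

theorem mem_pvPeel (l : List Char) (c : Char) : c ∈ pvPeel l ↔ 2 ≤ l.count c := by
  rw [← List.count_pos_iff, count_pvPeel]
  by_cases h : c ∈ l
  · have := List.count_pos_iff.mpr h
    simp [h]; omega
  · have : l.count c = 0 := List.count_eq_zero.mpr h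
    simp [h, this]

theorem pvSd_pvPeel (l : List Char) :
    pvSd (pvPeel l) = (pvSd l).filter (fun c => decide (2 ≤ l.count c)) := by
  unfold pvSd
  apply PySem.List.sorted_eq_of_perm_of_pairwise_lt
  · apply (List.perm_ext_iff_of_nodup ?_ ?_).mpr
    · intro c
      simp only [List.mem_filter, decide_eq_true_eq]
      rw [PySem.Set.mem_ofList, mem_pvPeel]
      constructor
      · intro ⟨hc, h2⟩; exact h2
      · intro h2
        refine ⟨(mem_pvSd l c).mpr ?_, h2⟩
        exact List.count_pos_iff.mp (by omega)
    · exact (pvSd_nodup l).filter _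
    · exact PySem.Set.nodup_ofList _
  · exact (PySem.List.sorted_ofList_pairwise_lt l).filter _

theorem pvMax_nil : pvMax [] = 0 := by decide

theorem pvMax_spec (l : List Char) (h : l ≠ []) :
    (∃ c ∈ l, (l.count c : Int) = pvMax l) ∧ (∀ c ∈ l, (l.count c : Int) ≤ pvMax l) := by
  have hne : (PySem.Set.ofList l).map (fun k => (l.count k : Int)) ≠ [] := by
    rcases List.exists_mem_of_ne_nil l h with ⟨x, hx⟩
    have : x ∈ PySem.Set.ofList l := (PySem.Set.mem_ofList _ _).mpr hx
    intro hcon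
    rw [List.map_eq_nil_iff.mp hcon] at this
    exact absurd this (List.not_mem_nil)
  unfold pvMax
  cases hm : PySem.List.max? ((PySem.Set.ofList l).map (fun k => (l.count k : Int)))
      (fun v => v) with
  | none => exact absurd ((PySem.List.max?_eq_none_iff _ _).mp hm) hne
  | some v =>
      have hmem := PySem.List.max?_mem hm
      have hmax := PySem.List.max?_isMax hm
      obtain ⟨c, hc, hcv⟩ := List.mem_map.mp hmem
      constructor
      · exact ⟨c, (PySem.Set.mem_ofList _ _).mp hc, hcv⟩
      · intro c' hc'
        exact hmax _ (List.mem_map.mpr ⟨c', (PySem.Set.mem_ofList _ _).mpr hc', rfl⟩)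

theorem pvMax_pos (l : List Char) (h : l ≠ []) : 1 ≤ pvMax l := by
  obtain ⟨⟨c, hc, hceq⟩, _⟩ := pvMax_spec l h
  have := List.count_pos_iff.mpr hc
  omega

theorem pvMax_pvPeel (l : List Char) (h : l ≠ []) : pvMax (pvPeel l) = pvMax l - 1 := by
  obtain ⟨⟨c0, hc0, hc0eq⟩, hub⟩ := pvMax_spec l h
  by_cases hp : pvPeel l = []
  · rw [hp, pvMax_nil]
    have hpos := List.count_pos_iff.mpr hc0
    have h1 : l.count c0 = 1 := by
      by_contra hne1
      have : c0 ∈ pvPeel l := (mem_pvPeel l c0).mpr (by omega)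
      simp [hp] at this
    omega
  · obtain ⟨⟨c, hc, hceq⟩, hub'⟩ := pvMax_spec (pvPeel l) hp
    have h2c : 2 ≤ l.count c := (mem_pvPeel l c).mp hc
    have hcl : c ∈ l := List.count_pos_iff.mp (by omega)
    have hpc : (pvPeel l).count c = l.count c - 1 := by rw [count_pvPeel]; simp [hcl]
    have hM2 : 2 ≤ l.count c0 := by have := hub c hcl; omega
    have hc0p : c0 ∈ pvPeel l := (mem_pvPeel l c0).mpr hM2
    have hpc0 : (pvPeel l).count c0 = l.count c0 - 1 := by rw [count_pvPeel]; simp [hc0]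
    have hb1 := hub' c0 hc0p
    have hb2 := hub c hcl
    omega

theorem pvLayers_step (l : List Char) (h : l ≠ []) :
    pvLayers l = pvSd l ++ pvLayers (pvPeel l) := by
  unfold pvLayers
  rw [pvMax_pvPeel l h, pvSd_pvPeel]
  have hM := pvMax_pos l h
  rw [PySem.List.pyRange_one_cons (by omega : (1:Int) < pvMax l + 1)]
  rw [List.flatMap_cons]
  congr 1
  · apply List.filter_eq_self.mpr
    intro c hcmem
    have hcl : c ∈ l := (mem_pvSd l c).mp hcmem
    have := List.count_pos_iff.mpr hcl
    simp only [decide_eq_true_eq]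
    omega
  · have e1 : pvMax l - 1 + 1 = pvMax l := by ring
    rw [e1, PySem.List.pyRange_one (1 + 1) (pvMax l + 1), PySem.List.pyRange_one 1 (pvMax l)]
    have e2 : (pvMax l + 1 - (1 + 1)).toNat = (pvMax l - 1).toNat := by omega
    rw [e2, List.flatMap_map, List.flatMap_map]
    apply List.flatMap_congr
    intro j _
    rw [List.filter_filter]
    apply List.filter_congr
    intro c hcmem
    have hcl : c ∈ l := (mem_pvSd l c).mp hcmem
    have h1 : 1 ≤ l.count c := List.count_pos_iff.mpr hcl
    have hpc : (pvPeel l).count c = l.count c - 1 := by rw [count_pvPeel]; simp [hcl]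
    rw [← Bool.decide_and]
    rw [decide_eq_decide]
    constructor
    · intro hP
      refine ⟨?_, by omega⟩
      rw [hpc]
      omega
    · intro hq
      have hq1 := hq.1
      rw [hpc] at hq1
      omega

theorem pvLayers_nil : pvLayers [] = [] := by decide

theorem main_eq_aux : ∀ (n : Nat) (l : List Char), l.length ≤ n → solutionLoop l = pvLayers l := by
  intro n
  induction n with
  | zero =>
      intro l hl
      have : l = [] := List.eq_nil_of_length_eq_zero (Nat.le_zero.mp hl)
      subst this
      rw [solutionLoop, pvLayers_nil]
      simp
  | succ n ih =>
      intro l hl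
      by_cases h : l = []
      · subst h; rw [solutionLoop, pvLayers_nil]; simp
      · rw [solutionLoop, dif_neg h, pvLayers_step l h]
        have hlt := pvPeel_length_lt l h
        rw [ih (pvPeel l) (by omega)]

theorem main_eq (l : List Char) : solutionLoop l = pvLayers l :=
  main_eq_aux l.length l le_rfl

theorem solution_alt_eq (source : String) :
    solution_alt source = String.ofList (pvLayers source.toList) := by
  unfold solution_alt pvLayers pvMax pvSd
  rw [PySem.Dict.foldl_insert_getD_add_one_eq_counter]
  simp only [PySem.Dict.keys_counter, PySem.Dict.getD_counter, PySem.Dict.values,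
    PySem.Dict.items_counter, List.map_map]
  congr 1
  rw [show ∀ (g : Int → List Char) (r : List Int), r.flatMap g = r.foldl (fun a k => a ++ g k) []
      from fun g r => by rw [PySem.List.foldl_append_eq_flatMap]; simp]
  apply PySem.List.foldl_congr_mem
  intro acc k _
  have hinner := PySem.List.foldl_append_if
    (fun ch => decide (k ≤ (List.count ch source.toList : Int))) (fun ch => ch)
    (PySem.List.sorted (PySem.Set.ofList source.toList) (fun x => x) false) acc
  simp only [decide_eq_true_eq, List.map_id'] at hinner
  rw [hinner]

-- ===== VERDICT (by name: the statement is the Claim_ definition above) =====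
theorem solution_spec : Claim_equal_solution := by
  intro source _
  unfold Spec_solution
  rw [solution_alt_eq, solution, main_eq]
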